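-- pv_equiv track=rewrite | github.com/aysieelf/Alpha63 | Week_2/2_Git/tuple_myversion.py | replace_subtuple
-- ===== SOURCE A (Python) =====
-- def replace_subtuple(sub_tuple, new_sub_tuple, the_tuple):
--     """
--     Replace a subtuple in a tuple with a new subtuple.
--     Returns the original tuple if it does not contain the subtuple to be replaced.
--
--     Parameters:
--         sub_tuple (tuple) - The subtuple to be replaced
--         new_sub_tuple (tuple) - The new subtuple
--         the_tuple (tuple) - The target tuple
--
--     Returns:
--         (tuple) - The resulting tuple
--     """
--     index = -1
--     for i in range(len(the_tuple) - len(sub_tuple) + 1):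
--         if sub_tuple == the_tuple[i:i + len(sub_tuple)]:
--             index = i
--             break
--     if index == -1:
--         return the_tuple
--     new_lst = the_tuple[:index] + new_sub_tuple + the_tuple[index + len(sub_tuple):]
--
--     return tuple(new_lst)
-- ===== SOURCE B (Python) =====
-- def replace_subtuple(sub_tuple, new_sub_tuple, the_tuple):
--     """Rabin-Karp: find the leftmost occurrence with a rolling hash, then splice."""
--     m, n = len(sub_tuple), len(the_tuple)
--     if m > n:
--         return the_tuple
--     mod = 1000000007
--     base = 1024
--     target = 0
--     for x in sub_tuple:
--         target = (target * base + x) % mod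
--     h = 0
--     for x in the_tuple[:m]:
--         h = (h * base + x) % mod
--     pw = pow(base, m, mod)
--     i = 0
--     while True:
--         if h == target and the_tuple[i:i + m] == sub_tuple:
--             return the_tuple[:i] + tuple(new_sub_tuple) + the_tuple[i + m:]
--         if i + m >= n:
--             return the_tuple
--         h = (h * base - the_tuple[i] * pw + the_tuple[i + m]) % mod
--         i += 1
-- ===== Notes on version B (the rewrite author's own statement) =====
-- stated objective: alternative
-- what changed: B replaces A's compare-a-fresh-slice-at-every-position scan by Rabin-Karp: a rolling polynomial hash slides over the tuple and the full subtuple comparison is done only on a hash hit, then the replacement is spliced in.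
import Mathlib
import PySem

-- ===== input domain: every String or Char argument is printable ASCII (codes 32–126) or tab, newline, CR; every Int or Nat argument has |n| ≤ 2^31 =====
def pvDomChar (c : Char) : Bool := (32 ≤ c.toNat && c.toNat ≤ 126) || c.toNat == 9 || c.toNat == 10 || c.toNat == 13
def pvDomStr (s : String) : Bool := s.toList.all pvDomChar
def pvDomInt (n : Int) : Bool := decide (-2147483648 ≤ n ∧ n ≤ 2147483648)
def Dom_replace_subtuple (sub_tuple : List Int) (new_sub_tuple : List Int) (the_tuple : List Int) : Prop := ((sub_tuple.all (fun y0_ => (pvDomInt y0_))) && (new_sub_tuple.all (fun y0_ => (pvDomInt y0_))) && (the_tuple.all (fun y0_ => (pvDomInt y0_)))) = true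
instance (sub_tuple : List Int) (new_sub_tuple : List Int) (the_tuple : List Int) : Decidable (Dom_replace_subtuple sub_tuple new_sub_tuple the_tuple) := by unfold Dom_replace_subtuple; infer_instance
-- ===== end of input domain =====

-- B replaces A's slice-per-position scan by Rabin-Karp: a rolling hash locates the
-- leftmost occurrence (verified on hash hit), then the replacement is spliced in.

-- ===== PORT A =====
-- the 'for i in range(...): if sub == the_tuple[i:i+len(sub)]: index = i; break' loop,
-- as structural recursion over the range list with early exit
def pvFindA (sub_tuple the_tuple : List Int) : List Int → Int
  | [] => -1
  | i :: rest =>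
      if sub_tuple = PySem.List.slice the_tuple (some i) (some (i + sub_tuple.length)) then i
      else pvFindA sub_tuple the_tuple rest

def replace_subtuple (sub_tuple : List Int) (new_sub_tuple : List Int) (the_tuple : List Int) : List Int :=
  let index := pvFindA sub_tuple the_tuple
      (PySem.List.pyRange 0 ((the_tuple.length : Int) - (sub_tuple.length : Int) + 1) 1)
  if index = -1 then the_tuple
  else PySem.List.slice the_tuple none (some index) ++ new_sub_tuple ++
       PySem.List.slice the_tuple (some (index + (sub_tuple.length : Int))) none

-- ===== PORT B =====
def pvMOD : Int := 1000000007
def pvBASE : Int := 1024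

-- 'h = (h * base + x) % mod' folded over a list (used for both target and the window)
def pvHash (l : List Int) : Int :=
  l.foldl (fun h x => PySem.Int.mod (h * pvBASE + x) pvMOD) 0

-- the 'while True' loop; fuel = n - m - i counts the remaining slide steps
-- (fuel = 0 ↔ Python's 'i + m >= n' exit test)
def pvRKloop (sub_tuple new_sub_tuple the_tuple : List Int) (target pw : Int) (m : Nat) :
    Nat → Nat → Int → List Int
  | fuel, i, h =>
    if h = target ∧
        PySem.List.slice the_tuple (some (i : Int)) (some ((i : Int) + (m : Int))) = sub_tuple then
      PySem.List.slice the_tuple none (some (i : Int)) ++ new_sub_tuple ++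
        PySem.List.slice the_tuple (some ((i : Int) + (m : Int))) none
    else
      match fuel with
      | 0 => the_tuple
      | fuel' + 1 =>
          pvRKloop sub_tuple new_sub_tuple the_tuple target pw m fuel' (i + 1)
            (PySem.Int.mod
              (h * pvBASE - PySem.List.pyGetD the_tuple (i : Int) 0 * pw
                + PySem.List.pyGetD the_tuple ((i : Int) + (m : Int)) 0) pvMOD)

def replace_subtuple_alt (sub_tuple : List Int) (new_sub_tuple : List Int) (the_tuple : List Int) : List Int :=
  let m := sub_tuple.length
  let n := the_tuple.length
  if n < m then the_tuple
  else
    let target := pvHash sub_tuple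
    let h := pvHash (PySem.List.slice the_tuple none (some (m : Int)))
    let pw := PySem.Int.powMod pvBASE m pvMOD
    pvRKloop sub_tuple new_sub_tuple the_tuple target pw m (n - m) 0 h

-- ===== PRECONDITION & SPEC =====
def Spec_replace_subtuple (sub_tuple : List Int) (new_sub_tuple : List Int) (the_tuple : List Int) (out : List Int) : Prop := out = replace_subtuple_alt sub_tuple new_sub_tuple the_tuple
instance (sub_tuple : List Int) (new_sub_tuple : List Int) (the_tuple : List Int) (out : List Int) : Decidable (Spec_replace_subtuple sub_tuple new_sub_tuple the_tuple out) := by unfold Spec_replace_subtuple; infer_instance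

-- ===== CLAIM (what is proved, stated in full; the proofs are below) =====
def Claim_equal_replace_subtuple : Prop := ∀ (sub_tuple : List Int) (new_sub_tuple : List Int) (the_tuple : List Int), Dom_replace_subtuple sub_tuple new_sub_tuple the_tuple → Spec_replace_subtuple sub_tuple new_sub_tuple the_tuple (replace_subtuple sub_tuple new_sub_tuple the_tuple)

-- ===== LEMMAS AND PROOFS =====

-- first element of l satisfying c (proof-side characterisation of both searches)
def pvFirst (c : Int → Prop) [DecidablePred c] : List Int → Option Int
  | [] => none
  | i :: rest => if c i then some i else pvFirst c rest

theorem pvFirst_mem {c : Int → Prop} [DecidablePred c] {l : List Int} {i : Int}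
    (h : pvFirst c l = some i) : i ∈ l := by
  induction l with
  | nil => exact absurd h (by simp [pvFirst])
  | cons a rest ih =>
      unfold pvFirst at h
      split_ifs at h with hc
      · exact (Option.some_inj.mp h) ▸ List.mem_cons_self
      · exact List.mem_cons_of_mem _ (ih h)

-- A's search loop computes the first match (stated with B's comparison orientation)
theorem pvFindA_eq_first (sub_tuple the_tuple : List Int) (l : List Int) :
    pvFindA sub_tuple the_tuple l =
      (pvFirst (fun i => PySem.List.slice the_tuple (some i) (some (i + sub_tuple.length)) = sub_tuple) l).getD (-1) := by
  induction l with
  | nil => rfl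
  | cons a rest ih =>
      unfold pvFindA pvFirst
      by_cases hc : PySem.List.slice the_tuple (some a) (some (a + sub_tuple.length)) = sub_tuple
      · rw [if_pos hc.symm, if_pos hc]; rfl
      · rw [if_neg (fun h => hc h.symm), if_neg hc, ih]

-- the hash as a polynomial over ZMod 1000000007
def pvPhi (l : List Int) : ZMod 1000000007 :=
  l.foldl (fun (h : ZMod 1000000007) (x : Int) => h * 1024 + (x : ZMod 1000000007)) 0

theorem pvMOD_pos : (0 : Int) < pvMOD := by norm_num [pvMOD]

theorem pv_cast_mod (a : Int) :
    ((PySem.Int.mod a pvMOD : Int) : ZMod 1000000007) = (a : ZMod 1000000007) := by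
  rw [PySem.Int.mod_eq_emod_of_pos pvMOD_pos]
  have h := ZMod.intCast_mod a 1000000007
  have : ((1000000007 : Nat) : Int) = pvMOD := by norm_num [pvMOD]
  rw [this] at h
  exact h

theorem pv_int_eq_of_cast_eq {a b : Int} (ha0 : 0 ≤ a) (ha1 : a < pvMOD)
    (hb0 : 0 ≤ b) (hb1 : b < pvMOD)
    (h : (a : ZMod 1000000007) = (b : ZMod 1000000007)) : a = b := by
  have hmod := (ZMod.intCast_eq_intCast_iff a b 1000000007).mp h
  unfold Int.ModEq at hmod
  have hM : ((1000000007 : Nat) : Int) = pvMOD := by norm_num [pvMOD]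
  rw [hM, Int.emod_eq_of_lt ha0 ha1, Int.emod_eq_of_lt hb0 hb1] at hmod
  exact hmod

theorem pvHash_foldl_range (l : List Int) :
    ∀ init : Int, 0 ≤ init → init < pvMOD →
      0 ≤ l.foldl (fun h x => PySem.Int.mod (h * pvBASE + x) pvMOD) init ∧
      l.foldl (fun h x => PySem.Int.mod (h * pvBASE + x) pvMOD) init < pvMOD := by
  induction l with
  | nil => intro init h0 h1; exact ⟨h0, h1⟩
  | cons a l ih =>
      intro init _ _
      exact ih _ (PySem.Int.mod_nonneg _ pvMOD_pos) (PySem.Int.mod_lt _ pvMOD_pos)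

theorem pvHash_range (l : List Int) : 0 ≤ pvHash l ∧ pvHash l < pvMOD :=
  pvHash_foldl_range l 0 le_rfl pvMOD_pos

theorem pvHash_cast_foldl (l : List Int) :
    ∀ init : Int,
      ((l.foldl (fun h x => PySem.Int.mod (h * pvBASE + x) pvMOD) init : Int) : ZMod 1000000007)
        = l.foldl (fun (h : ZMod 1000000007) (x : Int) => h * 1024 + (x : ZMod 1000000007)) ((init : Int) : ZMod 1000000007) := by
  induction l with
  | nil => intro init; rfl
  | cons a l ih =>
      intro init
      rw [List.foldl_cons, List.foldl_cons, ih, pv_cast_mod]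
      push_cast [pvBASE]
      ring_nf

theorem pvHash_cast (l : List Int) :
    ((pvHash l : Int) : ZMod 1000000007) = pvPhi l := by
  have h := pvHash_cast_foldl l 0
  simpa [pvHash, pvPhi] using h

theorem pvPhi_foldl_init (l : List Int) :
    ∀ init : ZMod 1000000007,
      l.foldl (fun (h : ZMod 1000000007) (x : Int) => h * 1024 + (x : ZMod 1000000007)) init
        = init * 1024 ^ l.length + pvPhi l := by
  induction l with
  | nil => intro init; simp [pvPhi]
  | cons a l ih =>
      intro init
      rw [List.foldl_cons, ih]
      have h2 : pvPhi (a :: l) = (0 * 1024 + (a : ZMod 1000000007)) * 1024 ^ l.length + pvPhi l := by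
        rw [pvPhi, List.foldl_cons, ih]
      rw [h2]
      simp [pow_succ]
      ring

theorem pvPhi_cons (a : Int) (l : List Int) :
    pvPhi (a :: l) = (a : ZMod 1000000007) * 1024 ^ l.length + pvPhi l := by
  rw [pvPhi, List.foldl_cons, pvPhi_foldl_init]
  norm_num

theorem pvPhi_append_singleton (l : List Int) (x : Int) :
    pvPhi (l ++ [x]) = pvPhi l * 1024 + (x : ZMod 1000000007) := by
  simp [pvPhi, List.foldl_append]

-- sliding the window one step: (t.drop (i+1)).take m = ((t.drop i).take m ++ [t[i+m]]).tail
theorem pv_window_succ (t : List Int) (i m : Nat) (hlt : i + m < t.length) :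
    (t.drop (i+1)).take m
      = (((t.drop i).take m) ++ [t[i+m]'hlt]).tail := by
  have hu : m < (t.drop i).length := by
    rw [List.length_drop]; omega
  have h1 : (t.drop i).take (m+1) = (t.drop i).take m ++ [(t.drop i)[m]'hu] := by
    rw [List.take_add_one]
    congr 1
    rw [List.getElem?_eq_getElem hu]
    rfl
  have h2 : (t.drop i)[m]'hu = t[i+m]'hlt := List.getElem_drop
  rw [← h2, ← h1]
  -- now: (t.drop (i+1)).take m = ((t.drop i).take (m+1)).tail
  cases hdi : t.drop i with
  | nil => simp [hdi] at hu
  | cons b v =>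
      have hv : t.drop (i+1) = v := by
        rw [← List.tail_drop, hdi]; rfl
      rw [hv]
      simp

-- the ZMod value of the next window from the current one
theorem pvPhi_roll (t : List Int) (i m : Nat) (hlt : i + m < t.length) :
    pvPhi ((t.drop (i+1)).take m)
      = pvPhi ((t.drop i).take m) * 1024
        - ((t[i]'(by omega) : Int) : ZMod 1000000007) * 1024 ^ m
        + ((t[i+m]'hlt : Int) : ZMod 1000000007) := by
  have hu : m ≤ (t.drop i).length := by rw [List.length_drop]; omega
  rw [pv_window_succ t i m hlt]
  cases hs : (t.drop i).take m with
  | nil =>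
      have hm0 : m = 0 := by
        rcases List.take_eq_nil_iff.mp hs with h | h
        · exact h
        · rw [h] at hu; simp at hu; omega
      subst hm0
      simp [pvPhi]
  | cons a r =>
      have hlen : (a :: r).length = m := by
        rw [← hs, List.length_take]; omega
      have hlenr : r.length = m - 1 := by simp at hlen; omega
      have hm1 : 1 ≤ m := by simp at hlen; omega
      have ha : a = t[i]'(by omega) := by
        have h0 : ((t.drop i).take m)[0]? = some a := by rw [hs]; rfl
        have h1 : ((t.drop i).take m)[0]? = some (t[i]'(by omega)) := by
          rw [List.getElem?_take_of_lt (by omega), List.getElem?_drop,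
            List.getElem?_eq_getElem (by omega : i + 0 < t.length)]
          simp
        rw [h0] at h1
        exact Option.some_inj.mp h1
      show pvPhi (r ++ [t[i+m]'hlt]) = _
      rw [pvPhi_append_singleton, pvPhi_cons, ha, hlenr]
      have hpow : (1024 : ZMod 1000000007) ^ m = 1024 ^ (m - 1) * 1024 := by
        conv_lhs => rw [show m = (m - 1) + 1 by omega]
        rw [pow_succ]
      rw [hpow]
      ring

-- the Int-level rolling update performed by the loop
theorem pv_roll (t : List Int) (i m : Nat) (hlt : i + m < t.length) :
    PySem.Int.mod
        (pvHash ((t.drop i).take m) * pvBASE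
          - PySem.List.pyGetD t (i : Int) 0 * PySem.Int.powMod pvBASE m pvMOD
          + PySem.List.pyGetD t ((i : Int) + (m : Int)) 0) pvMOD
      = pvHash ((t.drop (i+1)).take m) := by
  have hg1 : PySem.List.pyGetD t (i : Int) 0 = t[i]'(by omega) := by
    rw [PySem.List.pyGetD_natCast, List.getD_eq_getElem?_getD,
      List.getElem?_eq_getElem (by omega : i < t.length)]
    rfl
  have hg2 : PySem.List.pyGetD t ((i : Int) + (m : Int)) 0 = t[i+m]'hlt := by
    have : (i : Int) + (m : Int) = ((i + m : Nat) : Int) := by push_cast; ring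
    rw [this, PySem.List.pyGetD_natCast, List.getD_eq_getElem?_getD,
      List.getElem?_eq_getElem hlt]
    rfl
  have hpw : ((PySem.Int.powMod 1024 m pvMOD : Int) : ZMod 1000000007)
      = (1024 : ZMod 1000000007) ^ m := by
    have : PySem.Int.powMod 1024 m pvMOD = PySem.Int.mod (1024 ^ m) pvMOD := rfl
    rw [this, pv_cast_mod]
    push_cast
    ring
  apply pv_int_eq_of_cast_eq (PySem.Int.mod_nonneg _ pvMOD_pos) (PySem.Int.mod_lt _ pvMOD_pos)
    (pvHash_range _).1 (pvHash_range _).2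
  rw [pv_cast_mod, hg1, hg2]
  push_cast [pvBASE]
  simp only [pvHash_cast]
  rw [pvPhi_roll t i m hlt, hpw]

-- the loop computes "splice at the first match in [i, n-m], else the_tuple"
theorem pvRKloop_eq (sub new t : List Int) (m n : Nat) (hn : n = t.length) (hmn : m ≤ n) :
    ∀ (fuel i : Nat) (h : Int), i + fuel = n - m → h = pvHash ((t.drop i).take m) →
      pvRKloop sub new t (pvHash sub) (PySem.Int.powMod pvBASE m pvMOD) m fuel i h =
        match pvFirst (fun j => PySem.List.slice t (some j) (some (j + (m : Int))) = sub)
            (PySem.List.pyRange (i : Int) ((n : Int) - (m : Int) + 1) 1) with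
        | none => t
        | some j => PySem.List.slice t none (some j) ++ new ++
            PySem.List.slice t (some (j + (m : Int))) none := by
  intro fuel
  induction fuel with
  | zero =>
      intro i h hfi hh
      have hi : i = n - m := by omega
      have hrange : PySem.List.pyRange (i : Int) ((n : Int) - (m : Int) + 1) 1
          = [(i : Int)] := by
        have : (n : Int) - (m : Int) + 1 = (i : Int) + 1 := by omega
        rw [this]
        exact PySem.List.pyRange_one_singleton _
      rw [hrange]
      by_cases hP : PySem.List.slice t (some (i : Int)) (some ((i : Int) + (m : Int))) = sub
      · have hh' : h = pvHash sub := by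
          rw [hh]
          congr 1
          rw [← hP, PySem.List.slice_natCast_add]
        rw [pvRKloop, if_pos ⟨hh', hP⟩]
        simp [pvFirst, hP]
      · rw [pvRKloop, if_neg (fun hc => hP hc.2)]
        simp [pvFirst, hP]
  | succ fuel' ih =>
      intro i h hfi hh
      have hib : i < n - m := by omega
      have hcons : PySem.List.pyRange (i : Int) ((n : Int) - (m : Int) + 1) 1
          = (i : Int) :: PySem.List.pyRange ((i : Int) + 1) ((n : Int) - (m : Int) + 1) 1 := by
        exact PySem.List.pyRange_one_cons (by omega)
      rw [hcons]
      by_cases hP : PySem.List.slice t (some (i : Int)) (some ((i : Int) + (m : Int))) = sub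
      · have hh' : h = pvHash sub := by
          rw [hh]; congr 1; rw [← hP, PySem.List.slice_natCast_add]
        rw [pvRKloop, if_pos ⟨hh', hP⟩]
        simp [pvFirst, hP]
      · rw [pvRKloop, if_neg (fun hc => hP hc.2)]
        have hlt : i + m < t.length := by omega
        have hroll : PySem.Int.mod
            (h * pvBASE - PySem.List.pyGetD t (i : Int) 0 * PySem.Int.powMod pvBASE m pvMOD
              + PySem.List.pyGetD t ((i : Int) + (m : Int)) 0) pvMOD
            = pvHash ((t.drop (i+1)).take m) := by
          rw [hh]; exact pv_roll t i m hlt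
        have hcast : ((i : Int) + 1) = ((i + 1 : Nat) : Int) := by push_cast; ring
        rw [hroll]
        have := ih (i + 1) (pvHash ((t.drop (i+1)).take m)) (by omega) rfl
        rw [hcast]
        rw [this]
        simp [pvFirst, hP]

theorem replace_subtuple_eq_alt (sub_tuple new_sub_tuple the_tuple : List Int) :
    replace_subtuple sub_tuple new_sub_tuple the_tuple =
      replace_subtuple_alt sub_tuple new_sub_tuple the_tuple := by
  unfold replace_subtuple replace_subtuple_alt
  rw [pvFindA_eq_first]
  by_cases hmn : the_tuple.length < sub_tuple.length
  · rw [if_pos hmn]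
    have hnil : PySem.List.pyRange 0 ((the_tuple.length : Int) - (sub_tuple.length : Int) + 1) 1
        = [] := PySem.List.pyRange_one_eq_nil (by omega)
    rw [hnil]
    simp [pvFirst]
  · rw [if_neg hmn]
    have hmn2 : sub_tuple.length ≤ the_tuple.length := by omega
    have h0 : PySem.List.slice the_tuple none (some (sub_tuple.length : Int))
        = (the_tuple.drop 0).take sub_tuple.length := by
      rw [PySem.List.slice_to_natCast]; rfl
    rw [h0]
    have hloop := pvRKloop_eq sub_tuple new_sub_tuple the_tuple sub_tuple.length the_tuple.length
      rfl hmn2 (the_tuple.length - sub_tuple.length) 0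
      (pvHash ((the_tuple.drop 0).take sub_tuple.length)) (by omega) rfl
    have hz : ((0 : Nat) : Int) = 0 := rfl
    rw [hz] at hloop
    rw [hloop]
    cases hfst : pvFirst (fun j => PySem.List.slice the_tuple (some j) (some (j + (sub_tuple.length : Int))) = sub_tuple)
        (PySem.List.pyRange 0 ((the_tuple.length : Int) - (sub_tuple.length : Int) + 1) 1) with
    | none => simp
    | some j =>
        have hj : j ∈ PySem.List.pyRange 0 ((the_tuple.length : Int) - (sub_tuple.length : Int) + 1) 1 :=
          pvFirst_mem hfst
        have h0j : 0 ≤ j := (PySem.List.mem_pyRange_one.mp hj).1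
        have hne : j ≠ -1 := by omega
        simp [hne]

-- ===== VERDICT (by name: the statement is the Claim_ definition above) =====
theorem replace_subtuple_spec : Claim_equal_replace_subtuple := by
  intro s n t _
  unfold Spec_replace_subtuple
  exact replace_subtuple_eq_alt s n t
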